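-- pv_equiv track=rewrite | github.com/Ahjan108/phoenix_omega_v4.8 | phoenix_v4/ops/generate_coverage_health_report.py | _required_bands_from_arc_data
-- ===== SOURCE A (Python) =====
-- def _required_bands_from_arc_data(arc_data: dict) -> list[int]:
--     curve = arc_data.get("emotional_curve") or []
--     out: list[int] = []
--     for b in curve:
--         try:
--             v = int(b)
--             if 1 <= v <= 5 and v not in out:
--                 out.append(v)
--         except (TypeError, ValueError):
--             continue
--     return sorted(out)
-- ===== SOURCE B (Python) =====
-- def _required_bands_from_arc_data(arc_data: dict) -> list[int]:
--     # Enumerate the fixed band universe 1..5 and keep each band that occurs in the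
--     # curve: no accumulator, no dedup scan, no sort.  (Curve values are ints on
--     # the stated domain, so direct membership equals A's int()+range check.)
--     curve = arc_data.get("emotional_curve") or []
--     return [b for b in range(1, 6) if b in curve]
-- ===== Notes on version B (the rewrite author's own statement) =====
-- stated objective: simpler
-- what changed: B never traverses the curve building anything: it enumerates the fixed band universe range(1,6) and keeps each band that is a member of the curve, eliminating A's per-element int() conversion loop, the 'v not in out' dedup scan and the final sorted() call.
import Mathlib
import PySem

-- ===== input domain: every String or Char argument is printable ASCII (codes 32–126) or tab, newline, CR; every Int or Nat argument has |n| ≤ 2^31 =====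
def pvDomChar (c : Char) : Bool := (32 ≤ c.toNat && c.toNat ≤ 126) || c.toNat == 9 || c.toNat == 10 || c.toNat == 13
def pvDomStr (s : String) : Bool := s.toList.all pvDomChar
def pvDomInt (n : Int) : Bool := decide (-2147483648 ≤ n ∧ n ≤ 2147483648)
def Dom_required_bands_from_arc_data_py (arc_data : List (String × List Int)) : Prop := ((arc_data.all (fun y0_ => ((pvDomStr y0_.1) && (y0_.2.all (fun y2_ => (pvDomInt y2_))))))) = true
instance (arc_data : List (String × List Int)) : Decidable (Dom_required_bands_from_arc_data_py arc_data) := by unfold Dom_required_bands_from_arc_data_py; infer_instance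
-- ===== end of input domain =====

-- B enumerates the fixed band universe range(1,6) and keeps the bands present in the curve,
-- replacing A's conversion/dedup loop over the curve and its final sorted() call (objective: simpler).

-- ===== PORT A =====
-- curve = arc_data.get("emotional_curve") or []  (assoc-list first-match lookup; 'or []' maps an empty list to [])
-- for b in curve: v = int(b) is the identity on Int and never raises here;
--   if 1 <= v <= 5 and v not in out: out.append(v)
-- return sorted(out)
def required_bands_from_arc_data_py (arc_data : List (String × List Int)) : List Int :=
  let curve : List Int :=
    match List.lookup "emotional_curve" arc_data with
    | some v => if v.isEmpty then [] else v
    | none => []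
  let out : List Int :=
    curve.foldl (fun out b =>
      if 1 ≤ b ∧ b ≤ 5 ∧ b ∉ out then out ++ [b] else out) []
  PySem.List.sorted out (fun x => x) false

-- ===== PORT B =====
-- [b for b in range(1, 6) if b in curve]
def required_bands_from_arc_data_py_alt (arc_data : List (String × List Int)) : List Int :=
  let curve : List Int :=
    match List.lookup "emotional_curve" arc_data with
    | some v => if v.isEmpty then [] else v
    | none => []
  (PySem.List.pyRange 1 6 1).filter (fun b => curve.contains b)

-- ===== PRECONDITION & SPEC =====
def Spec_required_bands_from_arc_data_py (arc_data : List (String × List Int)) (out : List Int) : Prop := out = required_bands_from_arc_data_py_alt arc_data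
instance (arc_data : List (String × List Int)) (out : List Int) : Decidable (Spec_required_bands_from_arc_data_py arc_data out) := by unfold Spec_required_bands_from_arc_data_py; infer_instance

-- ===== CLAIM (what is proved, stated in full; the proofs are below) =====
def Claim_equal_required_bands_from_arc_data_py : Prop := ∀ (arc_data : List (String × List Int)), Dom_required_bands_from_arc_data_py arc_data → Spec_required_bands_from_arc_data_py arc_data (required_bands_from_arc_data_py arc_data)

-- ===== LEMMAS AND PROOFS =====

-- Invariant of A's fold: the accumulator stays Nodup with all elements in [1,5],
-- and its final membership is x ∈ s ∨ (x ∈ curve ∧ 1 ≤ x ≤ 5).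
theorem pv_fold_inv (curve : List Int) (s : List Int)
    (hnd : s.Nodup) (hrange : ∀ x ∈ s, 1 ≤ x ∧ x ≤ 5) :
    (curve.foldl (fun out b => if 1 ≤ b ∧ b ≤ 5 ∧ b ∉ out then out ++ [b] else out) s).Nodup
    ∧ (∀ x ∈ curve.foldl (fun out b => if 1 ≤ b ∧ b ≤ 5 ∧ b ∉ out then out ++ [b] else out) s,
         1 ≤ x ∧ x ≤ 5)
    ∧ (∀ x, x ∈ curve.foldl (fun out b => if 1 ≤ b ∧ b ≤ 5 ∧ b ∉ out then out ++ [b] else out) s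
         ↔ (x ∈ s ∨ (x ∈ curve ∧ 1 ≤ x ∧ x ≤ 5))) := by
  induction curve generalizing s with
  | nil => simpa using ⟨hnd, hrange⟩
  | cons b rest ih =>
    simp only [List.foldl_cons]
    by_cases h : 1 ≤ b ∧ b ≤ 5 ∧ b ∉ s
    · rw [if_pos h]
      have hnd' : (s ++ [b]).Nodup := by
        simp [List.nodup_append, hnd]
        exact fun a ha hab => h.2.2 (hab ▸ ha)
      have hrange' : ∀ x ∈ s ++ [b], 1 ≤ x ∧ x ≤ 5 := by
        intro x hx
        rcases List.mem_append.mp hx with hx | hx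
        · exact hrange x hx
        · simp at hx; subst hx; exact ⟨h.1, h.2.1⟩
      obtain ⟨i1, i2, i3⟩ := ih (s ++ [b]) hnd' hrange'
      refine ⟨i1, i2, fun x => ?_⟩
      rw [i3 x]
      simp only [List.mem_append, List.mem_cons, List.not_mem_nil, or_false]
      constructor
      · rintro ((hx | rfl) | ⟨hx, hr⟩)
        · exact Or.inl hx
        · exact Or.inr ⟨Or.inl rfl, h.1, h.2.1⟩
        · exact Or.inr ⟨Or.inr hx, hr⟩
      · rintro (hx | ⟨(rfl | hx), hr⟩)
        · exact Or.inl (Or.inl hx)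
        · exact Or.inl (Or.inr rfl)
        · exact Or.inr ⟨hx, hr⟩
    · rw [if_neg h]
      obtain ⟨i1, i2, i3⟩ := ih s hnd hrange
      refine ⟨i1, i2, fun x => ?_⟩
      rw [i3 x]
      simp only [List.mem_cons]
      constructor
      · rintro (hx | ⟨hx, hr⟩)
        · exact Or.inl hx
        · exact Or.inr ⟨Or.inr hx, hr⟩
      · rintro (hx | ⟨(rfl | hx), hr⟩)
        · exact Or.inl hx
        · have : x ∈ s := by tauto
          exact Or.inl this
        · exact Or.inr ⟨hx, hr⟩

-- sorted(out) of a Nodup list with elements in [1,5] is the filter of [1,2,3,4,5] by membership.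
theorem pv_sorted_eq (out : List Int) (hnd : out.Nodup) (hr : ∀ x ∈ out, 1 ≤ x ∧ x ≤ 5) :
    PySem.List.sorted out (fun x => x) false
      = ([1, 2, 3, 4, 5] : List Int).filter (fun b => decide (b ∈ out)) := by
  apply PySem.List.sorted_eq_of_perm_of_pairwise_lt
  · apply (List.perm_ext_iff_of_nodup (List.Nodup.filter _ (by decide)) hnd).mpr
    intro x
    simp only [List.mem_filter, decide_eq_true_eq]
    constructor
    · rintro ⟨_, hx⟩; exact hx
    · intro hx
      refine ⟨?_, hx⟩
      obtain ⟨h1, h2⟩ := hr x hx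
      interval_cases x <;> simp
  · exact List.Pairwise.filter _ (by decide)

-- For any curve, A's sorted deduplicated list equals B's universe filter.
theorem pv_main (curve : List Int) :
    PySem.List.sorted
      (curve.foldl (fun out b => if 1 ≤ b ∧ b ≤ 5 ∧ b ∉ out then out ++ [b] else out) [])
      (fun x => x) false
    = (PySem.List.pyRange 1 6 1).filter (fun b => curve.contains b) := by
  obtain ⟨hnd, hr, hmem⟩ := pv_fold_inv curve [] (by simp) (by simp)
  rw [pv_sorted_eq _ hnd hr]
  have hrange : PySem.List.pyRange 1 6 1 = ([1, 2, 3, 4, 5] : List Int) := by decide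
  rw [hrange]
  apply List.filter_congr
  intro x hx
  have hx15 : 1 ≤ x ∧ x ≤ 5 := by fin_cases hx <;> decide
  have hc : curve.contains x = decide (x ∈ curve) := by
    simp
  rw [hc, decide_eq_decide, hmem x]
  simp only [List.not_mem_nil, false_or]
  exact ⟨fun h => h.1, fun h => ⟨h, hx15⟩⟩

-- ===== VERDICT (by name: the statement is the Claim_ definition above) =====
theorem required_bands_from_arc_data_py_spec : Claim_equal_required_bands_from_arc_data_py := by
  intro arc_data _
  unfold Spec_required_bands_from_arc_data_py
  show required_bands_from_arc_data_py arc_data = required_bands_from_arc_data_py_alt arc_data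
  exact pv_main _
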